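-- pv_equiv track=rewrite | github.com/amitkandari219/trading-system | paper_trading/decay_monitor.py | _count_consecutive_losses
-- ===== SOURCE A (Python) =====
-- def _count_consecutive_losses(pnls):
--     streak = 0
--     max_streak = 0
--     for p in pnls:
--         if p <= 0:
--             streak += 1
--             max_streak = max(max_streak, streak)
--         else:
--             streak = 0
--     return max_streak
-- ===== SOURCE B (Python) =====
-- from itertools import groupby
--
-- def _count_consecutive_losses(pnls):
--     return max((sum(1 for _ in g) for k, g in groupby(pnls, key=lambda x: x <= 0) if k),
--                default=0)
-- ===== Notes on version B (the rewrite author's own statement) =====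
-- stated objective: idiomatic
-- what changed: Replaced the explicit streak counter with reset branch by an itertools.groupby decomposition: split into maximal runs of same sign-predicate and take the max length of the non-positive runs.
import Mathlib
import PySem

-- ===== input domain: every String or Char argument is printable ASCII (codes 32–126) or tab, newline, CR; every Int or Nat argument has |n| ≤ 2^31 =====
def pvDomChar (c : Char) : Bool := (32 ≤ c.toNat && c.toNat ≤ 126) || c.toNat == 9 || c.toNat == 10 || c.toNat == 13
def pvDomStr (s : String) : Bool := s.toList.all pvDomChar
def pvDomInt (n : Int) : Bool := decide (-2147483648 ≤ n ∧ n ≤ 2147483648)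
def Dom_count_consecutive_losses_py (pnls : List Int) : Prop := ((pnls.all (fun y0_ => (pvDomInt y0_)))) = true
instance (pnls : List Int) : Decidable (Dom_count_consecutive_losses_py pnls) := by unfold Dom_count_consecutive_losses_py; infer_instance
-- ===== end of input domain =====

-- B replaces A's explicit streak counter by a groupby decomposition (max length of the
-- maximal non-positive runs); objective: idiomatic, same O(n) cost.

-- ===== PORT A =====
def count_consecutive_losses_py (pnls : List Int) : Int :=
  (pnls.foldl
    (fun (st : Int × Int) p =>
      if p ≤ 0 then (st.1 + 1, max st.2 (st.1 + 1)) else (0, st.2))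
    (0, 0)).2

-- ===== PORT B =====
-- itertools.groupby(pnls, key=lambda x: x <= 0), each group rendered as (key, length)
def pvGroupRuns (pnls : List Int) : List (Bool × Int) :=
  match pnls with
  | [] => []
  | p :: rest =>
    match pvGroupRuns rest with
    | [] => [(decide (p ≤ 0), 1)]
    | (k, n) :: t =>
      if decide (p ≤ 0) = k then (k, n + 1) :: t
      else (decide (p ≤ 0), 1) :: (k, n) :: t

-- max(..., default=0) over the lengths of the groups whose key is true
def count_consecutive_losses_py_alt (pnls : List Int) : Int :=
  ((pvGroupRuns pnls).filter (fun r => r.1)).foldr (fun r acc => max r.2 acc) 0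

-- ===== PRECONDITION & SPEC =====
def Spec_count_consecutive_losses_py (pnls : List Int) (out : Int) : Prop := out = count_consecutive_losses_py_alt pnls
instance (pnls : List Int) (out : Int) : Decidable (Spec_count_consecutive_losses_py pnls out) := by unfold Spec_count_consecutive_losses_py; infer_instance

-- ===== CLAIM (what is proved, stated in full; the proofs are below) =====
def Claim_equal_count_consecutive_losses_py : Prop := ∀ (pnls : List Int), Dom_count_consecutive_losses_py pnls → Spec_count_consecutive_losses_py pnls (count_consecutive_losses_py pnls)

-- ===== LEMMAS AND PROOFS =====

-- max over the true-run lengths (B's final fold)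
def pvF (rs : List (Bool × Int)) : Int :=
  (rs.filter (fun r => r.1)).foldr (fun r acc => max r.2 acc) 0

-- pvF, with a pending current streak s merged into a leading true-run
def pvFs (s : Int) (rs : List (Bool × Int)) : Int :=
  match rs with
  | (true, n) :: t => max (s + n) (pvF t)
  | _ => pvF rs

theorem pvFs_zero (rs : List (Bool × Int)) : pvFs 0 rs = pvF rs := by
  match rs with
  | [] => rfl
  | (true, n) :: t => simp [pvFs, pvF, List.filter]
  | (false, n) :: t => rfl

-- A's loop, generalized over the starting state
def pvG (pnls : List Int) (s m : Int) : Int :=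
  (pnls.foldl
    (fun (st : Int × Int) p =>
      if p ≤ 0 then (st.1 + 1, max st.2 (st.1 + 1)) else (0, st.2))
    (s, m)).2

theorem pvG_split (pnls : List Int) : ∀ s m : Int, 0 ≤ m →
    pvG pnls s m = max m (pvG pnls s 0) := by
  induction pnls with
  | nil => intro s m hm; simp [pvG]; omega
  | cons p rest ih =>
    intro s m hm
    by_cases hp : p ≤ 0
    · have e1 : pvG (p :: rest) s m = pvG rest (s + 1) (max m (s + 1)) := by
        simp [pvG, List.foldl, hp]
      have e2 : pvG (p :: rest) s 0 = pvG rest (s + 1) (max 0 (s + 1)) := by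
        simp [pvG, List.foldl, hp]
      rw [e1, e2, ih (s + 1) (max m (s + 1)) (by omega),
          ih (s + 1) (max 0 (s + 1)) (by omega)]
      omega
    · have e1 : pvG (p :: rest) s m = pvG rest 0 m := by
        simp [pvG, List.foldl, hp]
      have e2 : pvG (p :: rest) s 0 = pvG rest 0 0 := by
        simp [pvG, List.foldl, hp]
      rw [e1, e2]; exact ih 0 m hm

theorem pvGroupRuns_pos (pnls : List Int) : ∀ r ∈ pvGroupRuns pnls, 1 ≤ r.2 := by
  induction pnls with
  | nil => intro r hr; simp [pvGroupRuns] at hr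
  | cons p rest ih =>
    intro r hr
    match hrec : pvGroupRuns rest with
    | [] =>
      rw [pvGroupRuns, hrec] at hr
      simp at hr; simp [hr]
    | (k, n) :: t =>
      have hn : (1 : Int) ≤ n := ih (k, n) (by rw [hrec]; exact List.mem_cons_self ..)
      rw [pvGroupRuns, hrec] at hr
      by_cases hk : decide (p ≤ 0) = k
      · simp [hk] at hr
        rcases hr with h | h
        · simp [h]; omega
        · exact ih r (by rw [hrec]; exact List.mem_cons_of_mem _ h)
      · simp [hk] at hr
        rcases hr with h | h | h
        · simp [h]
        · simp [h]; omega
        · exact ih r (by rw [hrec]; exact List.mem_cons_of_mem _ h)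

theorem pvG_eq_pvFs (pnls : List Int) : ∀ s : Int, 0 ≤ s →
    pvG pnls s 0 = pvFs s (pvGroupRuns pnls) := by
  induction pnls with
  | nil => intro s _; rfl
  | cons p rest ih =>
    intro s hs
    by_cases hp : p ≤ 0
    · have hstep : pvG (p :: rest) s 0 = pvG rest (s + 1) (max 0 (s + 1)) := by
        simp [pvG, List.foldl, hp]
      have hm : max (0 : Int) (s + 1) = s + 1 := by omega
      rw [hstep, hm, pvG_split rest (s + 1) (s + 1) (by omega), ih (s + 1) (by omega)]
      match hrec : pvGroupRuns rest with
      | [] =>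
        simp [pvGroupRuns, hrec, hp, pvFs, pvF]
      | (true, n) :: t =>
        have hn : (1 : Int) ≤ n :=
          pvGroupRuns_pos rest (true, n) (by rw [hrec]; exact List.mem_cons_self ..)
        simp [pvGroupRuns, hrec, hp, pvFs]
        omega
      | (false, n) :: t =>
        simp [pvGroupRuns, hrec, hp, pvFs, pvF]
    · have hstep : pvG (p :: rest) s 0 = pvG rest 0 0 := by
        simp [pvG, List.foldl, hp]
      rw [hstep, ih 0 le_rfl, pvFs_zero]
      match hrec : pvGroupRuns rest with
      | [] =>
        simp [pvGroupRuns, hrec, hp, pvFs, pvF]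
      | (true, n) :: t =>
        simp [pvGroupRuns, hrec, hp, pvFs, pvF]
      | (false, n) :: t =>
        simp [pvGroupRuns, hrec, hp, pvFs, pvF]

-- ===== VERDICT (by name: the statement is the Claim_ definition above) =====
theorem count_consecutive_losses_py_spec : Claim_equal_count_consecutive_losses_py := by
  intro pnls _
  show count_consecutive_losses_py pnls = count_consecutive_losses_py_alt pnls
  have : count_consecutive_losses_py pnls = pvG pnls 0 0 := rfl
  rw [this, pvG_eq_pvFs pnls 0 le_rfl, pvFs_zero]
  rfl
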